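-- pv_equiv track=rewrite | github.com/jgrou/ProjectEuler | FractionsAndSumOfPowersOfTwo.py | even2
-- ===== SOURCE A (Python) =====
-- def even(BinExp):
--     if len(BinExp) & 1:  # Odd number
--         return even(BinExp[:-1])
--     if len(BinExp) == 0:
--         return 1
--     res = (BinExp[0] * BinExp[1] + 1) * even(BinExp[2:])
--     if len(BinExp) > 2:
--         res += BinExp[0] * BinExp[-1]
--     for i in range(3, len(BinExp)-2, 2):
--         res += BinExp[0] * BinExp[i] * even(BinExp[i+1:])
--     return res
--
-- def even2(BinExp):
--     if len(BinExp) & 1:  # Odd number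
--         return even(BinExp[:-1])
--     if len(BinExp) == 0:
--         return 1
--     res = (BinExp[-1] * BinExp[-2] + 1) * even(BinExp[:-2])
--     if len(BinExp) > 2:
--         res += BinExp[0] * BinExp[-1]
--     for i in range(3, len(BinExp)-2, 2):
--         res += BinExp[-1] * BinExp[i] * even(BinExp[:i])
--     return res
-- ===== SOURCE B (Python) =====
-- def _cont(xs):
--     # Iterative continuant: a = K(prefix), b = K(prefix without its last element).
--     a, b = 1, 0
--     for v in xs:
--         a, b = v * a + b, a
--     return a
--
-- def even2(BinExp):
--     n = len(BinExp)
--     if n % 2: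
--         return _cont(BinExp[:n - 1])
--     if n == 0:
--         return 1
--     res = (BinExp[n - 1] * BinExp[n - 2] + 1) * _cont(BinExp[:n - 2])
--     if n > 2:
--         res += BinExp[n - 1] * (BinExp[0] + sum(
--             BinExp[i] * _cont(BinExp[:i - 1]) for i in range(3, n - 2, 2)))
--     return res
-- ===== Notes on version B (the rewrite author's own statement) =====
-- stated objective: faster
-- what changed: A's helper `even` recomputes itself exponentially over slices; B observes that every recursive value A needs is a continuant of a prefix and computes each one with a linear iterative three-term recurrence (a, b = v*a + b, a), removing all recursion. Intended as faster (asymptotic); a timing run measured B 1.65x at n=16 and A timing out at n=64 where B returns, so the ratio at large sizes could not be confirmed.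
import Mathlib
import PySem

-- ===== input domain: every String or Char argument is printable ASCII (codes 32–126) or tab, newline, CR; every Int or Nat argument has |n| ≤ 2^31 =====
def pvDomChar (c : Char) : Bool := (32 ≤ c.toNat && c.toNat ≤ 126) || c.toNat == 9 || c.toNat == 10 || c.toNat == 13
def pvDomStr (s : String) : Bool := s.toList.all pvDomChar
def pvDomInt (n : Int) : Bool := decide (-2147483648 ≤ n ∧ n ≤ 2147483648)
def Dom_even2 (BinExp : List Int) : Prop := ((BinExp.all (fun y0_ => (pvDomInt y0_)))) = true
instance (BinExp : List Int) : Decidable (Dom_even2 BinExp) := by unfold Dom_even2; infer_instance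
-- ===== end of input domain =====

-- B replaces A's exponential recursive helper `even` by a linear iterative continuant
-- (forward three-term recurrence), exploiting that every value A's `even2` needs is a
-- continuant of a prefix of the input. Intended as faster; a timing run measured
-- B 1.65x at n=16 and A timing out at n=64 where B still returns (unconfirmed beyond that).


-- ===== PORT A =====
def evenPy (l : List Int) : Int :=
  if l.length % 2 = 1 then
    evenPy (PySem.List.slice l none (some (-1)))
  else if l.length = 0 then 1
  else
    let res := (PySem.List.pyGetD l 0 0 * PySem.List.pyGetD l 1 0 + 1) *
      evenPy (PySem.List.slice l (some 2) none)
    let res := if 2 < l.length then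
        res + PySem.List.pyGetD l 0 0 * PySem.List.pyGetD l (-1) 0
      else res
    (PySem.List.pyRange 3 ((l.length : Int) - 2) 2).attach.foldl
      (fun r i => r + PySem.List.pyGetD l 0 0 * PySem.List.pyGetD l i.1 0 *
        evenPy (PySem.List.slice l (some (i.1 + 1)) none)) res
termination_by l.length
decreasing_by
  · simp [PySem.List.slice_to_neg_one, List.length_dropLast]; omega
  · rw [PySem.List.slice_from l (by norm_num)]
    simp only [List.length_drop]; omega
  · have h3 : 3 ≤ i.1 :=
      ((PySem.List.mem_pyRange_iff_of_pos (by norm_num : (0:Int) < 2) i.1).1 i.2).1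
    rw [PySem.List.slice_from l (by omega)]
    simp only [List.length_drop]; omega


def even2 (BinExp : List Int) : Int :=
  if BinExp.length % 2 = 1 then
    evenPy (PySem.List.slice BinExp none (some (-1)))
  else if BinExp.length = 0 then 1
  else
    let res := (PySem.List.pyGetD BinExp (-1) 0 * PySem.List.pyGetD BinExp (-2) 0 + 1) *
      evenPy (PySem.List.slice BinExp none (some (-2)))
    let res := if 2 < BinExp.length then
        res + PySem.List.pyGetD BinExp 0 0 * PySem.List.pyGetD BinExp (-1) 0
      else res
    (PySem.List.pyRange 3 ((BinExp.length : Int) - 2) 2).foldl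
      (fun r i => r + PySem.List.pyGetD BinExp (-1) 0 * PySem.List.pyGetD BinExp i 0 *
        evenPy (PySem.List.slice BinExp none (some i))) res

-- ===== PORT B =====
-- iterative continuant: a = K(prefix), b = K(prefix without its last element)
def cont (xs : List Int) : Int :=
  (xs.foldl (fun (p : Int × Int) v => (v * p.1 + p.2, p.1)) (1, 0)).1
def even2_alt (BinExp : List Int) : Int :=
  let n := BinExp.length
  if n % 2 = 1 then cont (BinExp.take (n - 1))
  else if n = 0 then 1
  else
    let res := (BinExp.getD (n - 1) 0 * BinExp.getD (n - 2) 0 + 1) * cont (BinExp.take (n - 2))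
    if 2 < n then
      res + BinExp.getD (n - 1) 0 *
        (BinExp.getD 0 0 + ((PySem.List.pyRange 3 ((n : Int) - 2) 2).map
          (fun i => PySem.List.pyGetD BinExp i 0 *
            cont (PySem.List.slice BinExp none (some (i - 1))))).sum)
    else res

-- ===== PRECONDITION & SPEC =====
def Spec_even2 (BinExp : List Int) (out : Int) : Prop := out = even2_alt BinExp
instance (BinExp : List Int) (out : Int) : Decidable (Spec_even2 BinExp out) := by unfold Spec_even2; infer_instance

-- ===== CLAIM (what is proved, stated in full; the proofs are below) =====
def Claim_equal_even2 : Prop := ∀ (BinExp : List Int), Dom_even2 BinExp → Spec_even2 BinExp (even2 BinExp)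

-- ===== LEMMAS AND PROOFS =====

-- the continuant K(x1..xn): proof-side characterisation of both programs
def K : List Int → Int
  | [] => 1
  | [x] => x
  | x :: y :: t => x * K (y :: t) + K t

theorem K_append_singleton (v : Int) : ∀ (l : List Int), l ≠ [] →
    K (l ++ [v]) = v * K l + K l.dropLast := by
  intro l
  induction l using K.induct with
  | case1 => intro hl; simp at hl
  | case2 x => intro _; simp [K]; ring
  | case3 x y t ih1 ih2 =>
    intro _
    have h1 := ih1 (by simp)
    rcases t with _ | ⟨a, t'⟩
    · simp [K]; ring
    · have h2 := ih2 (by simp)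
      simp only [List.cons_append, K] at *
      rw [h1, h2]
      have hd2 : (y :: a :: t').dropLast = y :: (a :: t').dropLast := by simp
      rw [hd2]
      rcases t' with _ | ⟨b, t''⟩
      · simp [K]; ring
      · have h3 : (a :: b :: t'').dropLast = a :: (b :: t'').dropLast := by simp
        rw [h3]
        simp [K]; ring

theorem cont_pair (l : List Int) :
    l.foldl (fun (p : Int × Int) v => (v * p.1 + p.2, p.1)) (1, 0)
      = (K l, if l = [] then 0 else K l.dropLast) := by
  induction l using List.reverseRecOn with
  | nil => simp [K]
  | append_singleton xs v ih =>
    rw [List.foldl_append, ih]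
    rcases eq_or_ne xs [] with h | h
    · subst h; simp [K]
    · simp only [List.foldl_cons, List.foldl_nil, if_neg h,
        if_neg (by simp : xs ++ [v] ≠ []), List.dropLast_concat]
      rw [K_append_singleton v xs h]

theorem cont_eq_K (l : List Int) : cont l = K l := by
  rw [cont, cont_pair]

theorem K_oddSum : ∀ (l : List Int), l.length % 2 = 1 →
    K l = ((List.range ((l.length + 1) / 2)).map
      (fun k => l.getD (2 * k) 0 * K (l.drop (2 * k + 1)))).sum := by
  intro l
  induction l using K.induct with
  | case1 => intro h; simp at h
  | case2 x => intro _; simp [K]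
  | case3 x y t ih1 ih2 =>
    intro h
    simp only [List.length_cons] at h
    have ht : t.length % 2 = 1 := by omega
    have ih := ih2 ht
    have hlen : (x :: y :: t).length = t.length + 2 := by simp
    have hm : ((x :: y :: t).length + 1) / 2 = (t.length + 1) / 2 + 1 := by rw [hlen]; omega
    rw [hm, List.range_succ_eq_map]
    simp only [List.map_cons, List.sum_cons, List.map_map]
    have hfun : ∀ k, ((x :: y :: t).getD (2 * (Nat.succ k)) 0 * K ((x :: y :: t).drop (2 * (Nat.succ k) + 1)))
        = t.getD (2 * k) 0 * K (t.drop (2 * k + 1)) := by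
      intro k
      have h1 : 2 * (Nat.succ k) = 2 * k + 2 := by omega
      rw [h1]
      rfl
    have : (List.map ((fun k => (x :: y :: t).getD (2 * k) 0 * K ((x :: y :: t).drop (2 * k + 1))) ∘ Nat.succ) (List.range ((t.length + 1) / 2))).sum
        = (List.map (fun k => t.getD (2 * k) 0 * K (t.drop (2 * k + 1))) (List.range ((t.length + 1) / 2))).sum := by
      exact congrArg List.sum (List.map_congr_left (fun k _ => hfun k))
    rw [this, ← ih]
    simp [K]

theorem K_even_expand (l : List Int) (h2 : l.length % 2 = 0) (h0 : l ≠ []) :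
    K l = (l.getD 0 0 * l.getD 1 0 + 1) * K (l.drop 2)
      + (if 2 < l.length then l.getD 0 0 * l.getD (l.length - 1) 0 else 0)
      + ((PySem.List.pyRange 3 ((l.length : Int) - 2) 2).map
          (fun i => l.getD 0 0 * l.getD i.toNat 0 * K (l.drop (i.toNat + 1)))).sum := by
  rcases l with _ | ⟨x, _ | ⟨y, t⟩⟩
  · simp at h0
  · simp at h2
  · have hn : (x :: y :: t).length = t.length + 2 := by simp
    have hte : t.length % 2 = 0 := by simp at h2; omega
    have hodd : (y :: t).length % 2 = 1 := by simp; omega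
    have hsum := K_oddSum (y :: t) hodd
    have hfun : ∀ k, (y :: t).getD (2 * k) 0 * K ((y :: t).drop (2 * k + 1))
        = (x :: y :: t).getD (2 * k + 1) 0 * K ((x :: y :: t).drop (2 * k + 2)) := fun k => rfl
    rw [List.map_congr_left (fun k _ => hfun k)] at hsum
    have hm : ((y :: t).length + 1) / 2 = t.length / 2 + 1 := by simp; omega
    rw [hm] at hsum
    set m : Nat := t.length / 2 + 1 with hmdef
    set f : Nat → Int := fun k => (x :: y :: t).getD (2 * k + 1) 0 * K ((x :: y :: t).drop (2 * k + 2)) with hf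
    have hsplit : ((List.range m).map f).sum
        = f 0 + ((List.range (m - 1 - 1)).map (fun k => f (k + 1))).sum
          + (if 1 ≤ m - 1 then f (m - 1) else 0) := by
      rcases Nat.eq_or_lt_of_le (by omega : 1 ≤ m) with h | h
      · rw [← h]; simp [List.range_succ_eq_map]
      · have hmm : m = ((m - 1 - 1) + 1) + 1 := by omega
        rw [hmm, List.range_succ, List.range_succ_eq_map]
        simp only [List.map_append, List.map_cons, List.sum_append, List.map_map, List.sum_cons,
          List.map_nil, List.sum_nil]
        rw [if_pos (by omega)]
        have hmm2 : (m - 1 - 1) + 1 = m - 1 := by omega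
        rw [hmm2]
        simp [Function.comp_def, Nat.succ_eq_add_one]
    have hf0 : f 0 = (x :: y :: t).getD 1 0 * K ((x :: y :: t).drop 2) := rfl
    have hlast : (if 1 ≤ m - 1 then f (m - 1) else 0)
        = (if 2 < (x :: y :: t).length then (x :: y :: t).getD ((x :: y :: t).length - 1) 0 * 1 else 0) := by
      rcases Nat.lt_or_ge t.length 2 with h | h
      · rw [if_neg (by omega), if_neg (by rw [hn]; omega)]
      · rw [if_pos (by omega), if_pos (by rw [hn]; omega)]
        have h1 : 2 * (m - 1) + 1 = t.length + 1 := by omega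
        have h2' : 2 * (m - 1) + 2 = t.length + 2 := by omega
        simp only [hf, h1, h2']
        have hd : (x :: y :: t).drop (t.length + 2) = [] :=
          List.drop_eq_nil_of_le (by rw [hn])
        have hg : (x :: y :: t).length - 1 = t.length + 1 := by rw [hn]; omega
        rw [hd, hg]
        rfl

    have hMnat : (if (3:Int) < ((x :: y :: t).length : Int) - 2
          then ((((x :: y :: t).length : Int) - 2 - 3 + 2 - 1) / 2).toNat else 0) = m - 1 - 1 := by
      rw [hn]
      rcases Nat.lt_or_ge t.length 4 with h | h
      · rw [if_neg (by push_cast; omega)]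
        omega
      · rw [if_pos (by push_cast; omega)]
        have he : ((t.length + 2 : Nat) : Int) - 2 - 3 + 2 - 1 = (((t.length - 2 : Nat)) : Int) := by
          push_cast [Nat.cast_sub (by omega : 2 ≤ t.length)]
          ring
        rw [he]
        omega
    have hterm : ∀ k : Nat,
        (x :: y :: t).getD 0 0 * (x :: y :: t).getD ((3 : Int) + 2 * (k : Int)).toNat 0
          * K ((x :: y :: t).drop (((3 : Int) + 2 * (k : Int)).toNat + 1))
        = x * f (k + 1) := by
      intro k
      have h1 : ((3 : Int) + 2 * (k : Int)).toNat = 2 * (k + 1) + 1 := by omega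
      have h2' : 2 * (k + 1) + 1 + 1 = 2 * (k + 1) + 2 := by omega
      rw [h1, h2', hf]
      show x * _ * _ = _
      ring
    have hrange : ((PySem.List.pyRange 3 (((x :: y :: t).length : Int) - 2) 2).map
          (fun i => (x :: y :: t).getD 0 0 * (x :: y :: t).getD i.toNat 0
            * K ((x :: y :: t).drop (i.toNat + 1)))).sum
        = x * ((List.range (m - 1 - 1)).map (fun k => f (k + 1))).sum := by
      rw [PySem.List.pyRange_of_pos 3 (((x :: y :: t).length : Int) - 2) (by norm_num), hMnat]
      simp only [List.map_map, Function.comp_def]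
      rw [List.map_congr_left (fun k _ => hterm k), ← List.sum_map_mul_left]
    have hKl : K (x :: y :: t) = x * K (y :: t) + K t := rfl
    have hKt : K ((x :: y :: t).drop 2) = K t := rfl
    have hx : (x :: y :: t).getD 0 0 = x := rfl
    rw [hKl, hsum, hsplit, hrange, hlast, hf0, hKt, hx]
    split_ifs
    · ring
    · ring

theorem evenPy_eq_K : ∀ (l : List Int), evenPy l = K (l.take (2 * (l.length / 2))) := by
  suffices H : ∀ (n : Nat) (l : List Int), l.length ≤ n → evenPy l = K (l.take (2 * (l.length / 2))) by
    intro l; exact H l.length l le_rfl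
  intro n
  induction n with
  | zero =>
    intro l hl
    have : l = [] := List.eq_nil_of_length_eq_zero (by omega)
    subst this
    rw [evenPy]
    norm_num [K]
  | succ n ih =>
    intro l hl
    rcases Nat.lt_or_ge l.length 1 with h0 | h0
    · have : l = [] := List.eq_nil_of_length_eq_zero (by omega)
      subst this
      rw [evenPy]; norm_num [K]
    rcases eq_or_ne (l.length % 2) 1 with hodd | heven
    · -- odd branch
      rw [evenPy, if_pos hodd, PySem.List.slice_to_neg_one]
      rw [ih l.dropLast (by simp [List.length_dropLast]; omega)]
      have h1 : l.dropLast.length = l.length - 1 := by simp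
      have h2 : 2 * (l.dropLast.length / 2) = l.length - 1 := by rw [h1]; omega
      rw [h2, List.take_of_length_le (by rw [h1])]
      have h3 : 2 * (l.length / 2) = l.length - 1 := by omega
      rw [h3, List.dropLast_eq_take]
    · -- even branch
      have hev : l.length % 2 = 0 := by omega
      have hne : l ≠ [] := by intro h; subst h; simp at h0
      rw [evenPy, if_neg (by omega), if_neg (by omega)]
      simp only []
      rw [List.foldl_attach (l := PySem.List.pyRange 3 ((l.length : Int) - 2) 2)
        (f := fun r i => r + PySem.List.pyGetD l 0 0 * PySem.List.pyGetD l i 0 *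
          evenPy (PySem.List.slice l (some (i + 1)) none))]
      have hbody : ∀ (r : Int), ∀ i ∈ PySem.List.pyRange 3 ((l.length : Int) - 2) 2,
          r + PySem.List.pyGetD l 0 0 * PySem.List.pyGetD l i 0 *
            evenPy (PySem.List.slice l (some (i + 1)) none)
          = r + l.getD 0 0 * l.getD i.toNat 0 * K (l.drop (i.toNat + 1)) := by
        intro r i hi
        obtain ⟨hi3, hiu, hidvd⟩ := (PySem.List.mem_pyRange_iff_of_pos (by norm_num) i).1 hi
        have hnn : (0:Int) ≤ i := by omega
        have hilt : i < (l.length : Int) := by omega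
        have hg1 : PySem.List.pyGetD l 0 0 = l.getD 0 0 := PySem.List.pyGetD_zero l 0
        have hg2 : PySem.List.pyGetD l i 0 = l.getD i.toNat 0 := by
          rw [PySem.List.pyGetD_eq_getElem l 0 hnn hilt,
            List.getD_eq_getElem l 0 (by omega)]
        have hsl : PySem.List.slice l (some (i + 1)) none = l.drop (i + 1).toNat :=
          PySem.List.slice_from l (by omega)
        have hlen : (l.drop (i + 1).toNat).length = l.length - (i + 1).toNat := by simp
        have heven' : (l.length - (i + 1).toNat) % 2 = 0 := by omega
        rw [hg1, hg2, hsl, ih _ (by rw [hlen]; omega)]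
        rw [hlen, List.take_of_length_le (by simp; omega)]
        have : (i + 1).toNat = i.toNat + 1 := by omega
        rw [this]
      rw [PySem.List.foldl_congr_mem _ _ _ _ hbody]
      rw [PySem.List.foldl_add]
      -- rewrite the head expressions
      have hg1 : PySem.List.pyGetD l 0 0 = l.getD 0 0 := PySem.List.pyGetD_zero l 0
      have hg2 : PySem.List.pyGetD l 1 0 = l.getD 1 0 := PySem.List.pyGetD_ofNat' l 1 0
      have hgm1 : PySem.List.pyGetD l (-1) 0 = l.getD (l.length - 1) 0 := by
        rw [PySem.List.pyGetD_neg_ofNat l 1 0 (by omega) (by omega),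
          List.getD_eq_getElem l 0 (by omega)]
      have hsl2 : PySem.List.slice l (some 2) none = l.drop 2 := by
        rw [PySem.List.slice_from l (by norm_num)]
        rfl
      have hdrop2 : evenPy (l.drop 2) = K (l.drop 2) := by
        rw [ih _ (by simp; omega)]
        rw [List.take_of_length_le (by simp; omega)]
      rw [hg1, hg2, hgm1, hsl2, hdrop2]
      have htake : l.take (2 * (l.length / 2)) = l := List.take_of_length_le (by omega)
      rw [htake]
      rw [K_even_expand l hev hne]
      split_ifs with hc
      · ring
      · ring

theorem even2_eq_alt (l : List Int) : even2 l = even2_alt l := by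
  rcases eq_or_ne (l.length % 2) 1 with hodd | hev
  · -- odd length
    rw [even2, if_pos hodd]
    simp only [even2_alt, if_pos hodd]
    rw [PySem.List.slice_to_neg_one, evenPy_eq_K, cont_eq_K]
    have h1 : l.dropLast.length = l.length - 1 := by simp
    have h2 : 2 * (l.dropLast.length / 2) = l.length - 1 := by rw [h1]; omega
    rw [h2, List.take_of_length_le (by rw [h1]), List.dropLast_eq_take]
  · rcases eq_or_ne l.length 0 with h0 | h0
    · rw [even2, if_neg hev, if_pos h0]
      simp only [even2_alt, if_neg hev, if_pos h0]
    · -- even length ≥ 2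
      have hge2 : 2 ≤ l.length := by omega
      have hmod : l.length % 2 = 0 := by omega
      rw [even2, if_neg hev, if_neg h0]
      simp only [even2_alt, if_neg hev, if_neg h0]
      -- head terms
      have hgm1 : PySem.List.pyGetD l (-1) 0 = l.getD (l.length - 1) 0 := by
        rw [PySem.List.pyGetD_neg_ofNat l 1 0 (by omega) (by omega),
          List.getD_eq_getElem l 0 (by omega)]
      have hgm2 : PySem.List.pyGetD l (-2) 0 = l.getD (l.length - 2) 0 := by
        rw [PySem.List.pyGetD_neg_ofNat l 2 0 (by omega) (by omega),
          List.getD_eq_getElem l 0 (by omega)]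
      have hg0 : PySem.List.pyGetD l 0 0 = l.getD 0 0 := PySem.List.pyGetD_zero l 0
      have hslm2 : PySem.List.slice l none (some (-2)) = l.take (l.length - 2) :=
        PySem.List.slice_to_neg_ofNat l 2 (by omega)
      have htk : ∀ m : Nat, m ≤ l.length → m % 2 = 0 → evenPy (l.take m) = K (l.take m) := by
        intro m hm hm2
        rw [evenPy_eq_K]
        have hl1 : (l.take m).length = m := by simp; omega
        rw [List.take_of_length_le (by rw [hl1]; omega)]
      rw [hgm1, hgm2, hg0, hslm2, htk (l.length - 2) (by omega) (by omega), cont_eq_K]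
      -- the loop side
      have hbody : ∀ (r : Int), ∀ i ∈ PySem.List.pyRange 3 ((l.length : Int) - 2) 2,
          r + l.getD (l.length - 1) 0 * PySem.List.pyGetD l i 0 *
            evenPy (PySem.List.slice l none (some i))
          = r + l.getD (l.length - 1) 0 * (l.getD i.toNat 0 * K (l.take (i.toNat - 1))) := by
        intro r i hi
        obtain ⟨hi3, hiu, hidvd⟩ := (PySem.List.mem_pyRange_iff_of_pos (by norm_num) i).1 hi
        have hgi : PySem.List.pyGetD l i 0 = l.getD i.toNat 0 := by
          rw [PySem.List.pyGetD_eq_getElem l 0 (by omega) (by omega),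
            List.getD_eq_getElem l 0 (by omega)]
        have hsl : PySem.List.slice l none (some i) = l.take i.toNat :=
          PySem.List.slice_to l (by omega)
        have hodd' : i.toNat % 2 = 1 := by omega
        rw [hgi, hsl, evenPy_eq_K]
        have hl1 : (l.take i.toNat).length = i.toNat := by simp; omega
        rw [hl1, List.take_take]
        have : 2 * (i.toNat / 2) = i.toNat - 1 := by omega
        rw [this]
        have : min (i.toNat - 1) i.toNat = i.toNat - 1 := by omega
        rw [this]
        ring
      rw [PySem.List.foldl_congr_mem _ _ _ _ hbody, PySem.List.foldl_add]
      -- B-side sum terms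
      have hmap : ∀ i ∈ PySem.List.pyRange 3 ((l.length : Int) - 2) 2,
          PySem.List.pyGetD l i 0 * cont (PySem.List.slice l none (some (i - 1)))
          = l.getD i.toNat 0 * K (l.take (i.toNat - 1)) := by
        intro i hi
        obtain ⟨hi3, hiu, hidvd⟩ := (PySem.List.mem_pyRange_iff_of_pos (by norm_num) i).1 hi
        have hgi : PySem.List.pyGetD l i 0 = l.getD i.toNat 0 := by
          rw [PySem.List.pyGetD_eq_getElem l 0 (by omega) (by omega),
            List.getD_eq_getElem l 0 (by omega)]
        have hsl : PySem.List.slice l none (some (i - 1)) = l.take (i.toNat - 1) := by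
          rw [PySem.List.slice_to l (by omega)]
          have : (i - 1).toNat = i.toNat - 1 := by omega
          rw [this]
        rw [hgi, hsl, cont_eq_K]
      rw [List.map_congr_left hmap]
      -- now pure arithmetic
      rcases eq_or_ne l.length 2 with h2 | h2
      · have hrange0 : PySem.List.pyRange 3 ((l.length : Int) - 2) 2 = [] := by
          rw [PySem.List.pyRange_of_pos _ _ (by norm_num), if_neg (by rw [h2]; norm_num)]
          simp
        rw [hrange0]
        have hn2 : ¬ 2 < l.length := by omega
        simp only [List.map_nil, List.sum_nil, if_neg hn2]
        ring
      · have hgt : 2 < l.length := by omega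
        rw [if_pos hgt, if_pos hgt,
          List.sum_map_mul_left (PySem.List.pyRange 3 ((l.length : Int) - 2) 2)
            (fun x => l.getD x.toNat 0 * K (List.take (x.toNat - 1) l))
            (l.getD (l.length - 1) 0)]
        ring

-- ===== VERDICT (by name: the statement is the Claim_ definition above) =====
theorem even2_spec : Claim_equal_even2 := by
  intro BinExp _
  unfold Spec_even2
  exact even2_eq_alt BinExp
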